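-- pv_equiv track=rewrite | github.com/yubinbai/Codejam | round1A 2008/rootDigits/main2.py | coef
-- ===== SOURCE A (Python) =====
-- def coef(a, b, N):
--     # get (3a+ rt5 * b) ^ N
--     if N == 1:
--         return a, b
--     if N % 2 == 0:
--         a1, b1 = coef(a, b, N // 2)
--         return a1 ** 2 + 5 * b1 ** 2, 2 * a1 * b1
--     else:
--         a1, b1 = coef(a, b, N // 2)
--         a2, b2 = a1 ** 2 + 5 * b1 ** 2, 2 * a1 * b1
--         return a * a2 + 5 * b * b2, a * b2 + a2 * b
-- ===== SOURCE B (Python) =====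
-- def coef(a, b, N):
--     # iterative exponentiation by squaring over (a + b*sqrt5) pairs
--     ra, rb = 1, 0
--     ca, cb = a, b
--     while N > 0:
--         if N % 2 == 1:
--             ra, rb = ra * ca + 5 * rb * cb, ra * cb + rb * ca
--         N //= 2
--         if N:
--             ca, cb = ca * ca + 5 * cb * cb, 2 * ca * cb
--     return ra, rb
-- ===== Notes on version B (the rewrite author's own statement) =====
-- stated objective: alternative
-- what changed: Replaces the top-down recursive halving (square the recursive result, multiply once more when the exponent is odd) by a bottom-up iterative square-and-multiply loop over the bits of N with an accumulator pair; Pre_ excludes N <= 0, where A recurses forever (RecursionError) and B's loop returns (1, 0).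
import Mathlib
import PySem

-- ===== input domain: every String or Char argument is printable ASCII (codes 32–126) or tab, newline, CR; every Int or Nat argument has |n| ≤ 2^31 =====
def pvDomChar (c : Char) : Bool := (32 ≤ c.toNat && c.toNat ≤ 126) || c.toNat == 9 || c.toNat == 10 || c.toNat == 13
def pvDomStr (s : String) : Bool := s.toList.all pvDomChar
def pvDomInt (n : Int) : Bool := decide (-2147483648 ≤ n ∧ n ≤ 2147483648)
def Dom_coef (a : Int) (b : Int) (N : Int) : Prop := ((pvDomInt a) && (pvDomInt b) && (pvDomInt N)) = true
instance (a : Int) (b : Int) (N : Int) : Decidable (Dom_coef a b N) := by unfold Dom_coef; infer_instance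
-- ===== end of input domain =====

-- B replaces A's recursive halving with an iterative square-and-multiply loop (same cost, different decomposition).

-- ===== PORT A =====
-- A recurses on N // 2; the fuel only makes the recursion total (N.toNat is ample depth
-- for every N ≥ 1, where the Python terminates); fuel 0 is never reached inside Pre_.
def coefFuel (a : Int) (b : Int) : Nat → Int → Int × Int
  | 0, _ => (a, b)
  | fuel + 1, N =>
    if N = 1 then (a, b)
    else if PySem.Int.mod N 2 = 0 then
      match coefFuel a b fuel (PySem.Int.floordiv N 2) with
      | (a1, b1) => (a1 ^ 2 + 5 * b1 ^ 2, 2 * a1 * b1)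
    else
      match coefFuel a b fuel (PySem.Int.floordiv N 2) with
      | (a1, b1) =>
        match (a1 ^ 2 + 5 * b1 ^ 2, 2 * a1 * b1) with
        | (a2, b2) => (a * a2 + 5 * b * b2, a * b2 + a2 * b)

def coef (a : Int) (b : Int) (N : Int) : Int × Int := coefFuel a b N.toNat N

-- ===== PORT B =====
-- the while-loop of Source B, state (ra, rb, ca, cb, N)
def coefLoop (ra rb ca cb N : Int) : Int × Int :=
  if _h : 0 < N then
    match (if PySem.Int.mod N 2 = 1 then (ra * ca + 5 * rb * cb, ra * cb + rb * ca) else (ra, rb)) with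
    | (ra', rb') =>
      -- 'if N:' guards the squaring; with N' = 0 the while-condition then fails and the loop returns the accumulator
      if PySem.Int.floordiv N 2 = 0 then (ra', rb')
      else coefLoop ra' rb' (ca * ca + 5 * cb * cb) (2 * ca * cb) (PySem.Int.floordiv N 2)
  else (ra, rb)
termination_by N.toNat
decreasing_by
  rw [PySem.Int.floordiv_eq_ediv_of_pos (by omega : (0:Int) < 2)] at *
  omega

def coef_alt (a : Int) (b : Int) (N : Int) : Int × Int := coefLoop 1 0 a b N

-- ===== PRECONDITION & SPEC =====
-- Pre_ excludes N ≤ 0, where the Python A never returns (infinite recursion on N // 2 → RecursionError).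
def Pre_coef (a : Int) (b : Int) (N : Int) : Prop := 1 ≤ N
instance (a : Int) (b : Int) (N : Int) : Decidable (Pre_coef a b N) := by unfold Pre_coef; infer_instance
def pvWitness_coef : Int × Int × Int := (2, 3, 5)

def Spec_coef (a : Int) (b : Int) (N : Int) (out : Int × Int) : Prop := out = coef_alt a b N
instance (a : Int) (b : Int) (N : Int) (out : Int × Int) : Decidable (Spec_coef a b N out) := by unfold Spec_coef; infer_instance

-- ===== CLAIM (what is proved, stated in full; the proofs are below) =====
def Claim_equal_coef : Prop := ∀ (a : Int) (b : Int) (N : Int), Dom_coef a b N → Pre_coef a b N → Spec_coef a b N (coef a b N)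

-- ===== LEMMAS AND PROOFS =====

-- multiplication in Z[sqrt 5] on coefficient pairs, and its powers
def pmul (p q : Int × Int) : Int × Int := (p.1 * q.1 + 5 * p.2 * q.2, p.1 * q.2 + p.2 * q.1)

def pw (p : Int × Int) : Nat → Int × Int
  | 0 => (1, 0)
  | n + 1 => pmul p (pw p n)

theorem pmul_one (p : Int × Int) : pmul p (1, 0) = p := by
  simp [pmul]

theorem one_pmul (p : Int × Int) : pmul (1, 0) p = p := by
  simp [pmul]

theorem pmul_assoc (p q r : Int × Int) : pmul (pmul p q) r = pmul p (pmul q r) := by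
  simp only [pmul, Prod.mk.injEq]; constructor <;> ring

theorem pw_succ (p : Int × Int) (n : Nat) : pw p (n + 1) = pmul p (pw p n) := rfl

theorem pw_add (p : Int × Int) (m n : Nat) : pw p (m + n) = pmul (pw p m) (pw p n) := by
  induction m with
  | zero => rw [pw, one_pmul, Nat.zero_add]
  | succ m ih =>
    have h : m + 1 + n = (m + n) + 1 := by omega
    rw [h, pw_succ, pw_succ, ih, ← pmul_assoc]

theorem pw_two_mul (p : Int × Int) (k : Nat) : pw (pmul p p) k = pw p (2 * k) := by
  induction k with
  | zero => rfl
  | succ k ih =>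
    have h2 : 2 * (k + 1) = (2 * k + 1) + 1 := by omega
    rw [pw_succ, ih, h2, pw_succ, pw_succ, ← pmul_assoc]

-- A's recursion computes the power, for any sufficient fuel
theorem coefFuel_eq_pw (a b : Int) : ∀ (fuel : Nat) (N : Int), 0 < N → N.toNat ≤ fuel →
    coefFuel a b fuel N = pw (a, b) N.toNat := by
  intro fuel
  induction fuel with
  | zero => intro N hN hle; omega
  | succ fuel ih =>
    intro N hN hle
    by_cases h1 : N = 1
    · subst h1
      simp [coefFuel, pw, pmul]
    · have h2 : 2 ≤ N := by omega
      have hfd : PySem.Int.floordiv N 2 = N / 2 :=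
        PySem.Int.floordiv_eq_ediv_of_pos (by omega)
      have hmd : PySem.Int.mod N 2 = N % 2 :=
        PySem.Int.mod_eq_emod_of_pos (by omega)
      have hMpos : 0 < N / 2 := by omega
      have hMle : (N / 2).toNat ≤ fuel := by omega
      have hrec := ih (N / 2) hMpos hMle
      obtain ⟨x, y, hk⟩ : ∃ x y, pw (a, b) (N / 2).toNat = (x, y) :=
        ⟨_, _, rfl⟩
      rw [hk] at hrec
      by_cases hev : PySem.Int.mod N 2 = 0
      · have hNnat : N.toNat = (N / 2).toNat + (N / 2).toNat := by omega
        rw [coefFuel, if_neg h1, if_pos hev, hfd, hrec, hNnat, pw_add, hk]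
        simp only [pmul, Prod.mk.injEq]
        constructor <;> ring
      · have hNnat : N.toNat = ((N / 2).toNat + (N / 2).toNat) + 1 := by omega
        rw [coefFuel, if_neg h1, if_neg hev, hfd, hrec, hNnat, pw_succ, pw_add, hk]
        simp only [pmul, Prod.mk.injEq]
        constructor <;> ring

-- B's loop invariant: result = accumulator * base ^ N.toNat
theorem coefLoop_eq (n : Nat) : ∀ (N ra rb ca cb : Int), N.toNat ≤ n →
    coefLoop ra rb ca cb N = pmul (ra, rb) (pw (ca, cb) N.toNat) := by
  induction n with
  | zero =>
    intro N ra rb ca cb hle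
    have h0 : ¬ 0 < N := by omega
    rw [coefLoop, dif_neg h0]
    have : N.toNat = 0 := by omega
    rw [this, pw, pmul_one]
  | succ n ih =>
    intro N ra rb ca cb hle
    by_cases hN : 0 < N
    · have hfd : PySem.Int.floordiv N 2 = N / 2 :=
        PySem.Int.floordiv_eq_ediv_of_pos (by omega)
      have hmd : PySem.Int.mod N 2 = N % 2 :=
        PySem.Int.mod_eq_emod_of_pos (by omega)
      have hMle : (N / 2).toNat ≤ n := by omega
      rw [coefLoop, dif_pos hN, hfd]
      by_cases hodd : PySem.Int.mod N 2 = 1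
      · simp only [if_pos hodd]
        by_cases hz : N / 2 = 0
        · have hN1 : N.toNat = 1 := by omega
          rw [if_pos hz, hN1]
          show _ = pmul (ra, rb) (pw (ca, cb) (0 + 1))
          simp only [pw, pmul, Prod.mk.injEq]; constructor <;> ring
        · have hNnat : N.toNat = 2 * (N / 2).toNat + 1 := by omega
          rw [if_neg hz, ih (N / 2) _ _ _ _ hMle, hNnat, pw_succ, ← pw_two_mul]
          have hsq : ((ca * ca + 5 * cb * cb, 2 * ca * cb) : Int × Int) = pmul (ca, cb) (ca, cb) := by
            simp only [pmul, Prod.mk.injEq, true_and]; ring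
          have hacc : ((ra * ca + 5 * rb * cb, ra * cb + rb * ca) : Int × Int) = pmul (ra, rb) (ca, cb) := by
            simp only [pmul]
          rw [hsq, hacc, pmul_assoc]
      · rw [hmd] at hodd
        have hz : ¬ N / 2 = 0 := by omega
        have hNnat : N.toNat = 2 * (N / 2).toNat := by omega
        simp only [if_neg (hmd ▸ hodd)]
        rw [if_neg hz, ih (N / 2) _ _ _ _ hMle, hNnat, ← pw_two_mul]
        have hsq : ((ca * ca + 5 * cb * cb, 2 * ca * cb) : Int × Int) = pmul (ca, cb) (ca, cb) := by
          simp only [pmul, Prod.mk.injEq, true_and]; ring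
        rw [hsq]
    · rw [coefLoop, dif_neg hN]
      have : N.toNat = 0 := by omega
      rw [this, pw, pmul_one]

-- ===== VERDICT (by name: the statement is the Claim_ definition above) =====
theorem coef_spec : Claim_equal_coef := by
  intro a b N _ hpre
  unfold Spec_coef coef coef_alt
  rw [coefFuel_eq_pw a b N.toNat N (by exact hpre) (le_refl _),
      coefLoop_eq N.toNat N 1 0 a b (le_refl _), one_pmul]
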